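-- pv_equiv track=rewrite | github.com/gardener/ops-toolbelt | src/generator/models.py | multiline_string_validator
-- ===== SOURCE A (Python) =====
-- def multiline_string_validator(value: str, prefix: str, suffix: str, joiner: str = "\n") -> str:
--     """Adds prefixes and suffixes to multiline strings"""
--     value = value.strip()
--     if '\n' not in value:
--         return value
--     processed_lines = [f"{prefix}{v}{suffix}" for v in value.splitlines() if v.strip() != ""]
--     processed_lines[-1] = processed_lines[-1].removesuffix(suffix)
--     processed_lines[0] = processed_lines[0].removeprefix(prefix)
--     return joiner.join(processed_lines)
-- ===== SOURCE B (Python) =====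
-- def multiline_string_validator(value: str, prefix: str, suffix: str, joiner: str = "\n") -> str:
--     """Adds prefixes and suffixes to multiline strings"""
--     value = value.strip()
--     if '\n' not in value:
--         return value
--     return (suffix + joiner + prefix).join(
--         v for v in value.splitlines() if v.strip() != "")
-- ===== Notes on version B (the rewrite author's own statement) =====
-- stated objective: simpler
-- what changed: Instead of wrapping every surviving line with prefix/suffix and then patching the first and last elements in place, B joins the filtered lines once with the single separator suffix+joiner+prefix, which yields the same string with no per-line wrapping or post-fixups.
import Mathlib
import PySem

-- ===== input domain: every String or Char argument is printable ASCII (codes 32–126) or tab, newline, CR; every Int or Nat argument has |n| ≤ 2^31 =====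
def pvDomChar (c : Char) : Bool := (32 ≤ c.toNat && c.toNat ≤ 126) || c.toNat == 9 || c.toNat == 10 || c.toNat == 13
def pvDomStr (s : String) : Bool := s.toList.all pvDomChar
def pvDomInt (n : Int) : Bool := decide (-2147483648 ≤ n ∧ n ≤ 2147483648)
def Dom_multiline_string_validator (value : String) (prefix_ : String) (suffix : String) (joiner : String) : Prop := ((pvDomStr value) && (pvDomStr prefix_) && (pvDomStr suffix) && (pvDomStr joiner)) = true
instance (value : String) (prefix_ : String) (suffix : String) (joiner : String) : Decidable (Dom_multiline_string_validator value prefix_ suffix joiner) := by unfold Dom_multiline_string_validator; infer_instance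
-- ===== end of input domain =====

-- B joins the filtered lines once with the single separator suffix+joiner+prefix instead of
-- wrapping every line and patching the first/last elements (objective: simpler; same result).

-- ===== PORT A =====
-- s.removesuffix(suf): drop suf from the end iff it is a suffix
def pvRemoveSuffix (cs suf : List Char) : List Char :=
  if PySem.Chars.endswith cs suf then cs.take (cs.length - suf.length) else cs

-- s.removeprefix(pre): drop pre from the front iff it is a prefix
def pvRemovePrefix (cs pre : List Char) : List Char :=
  if PySem.Chars.startswith cs pre then cs.drop pre.length else cs

def multiline_string_validator (value : String) (prefix_ : String) (suffix : String) (joiner : String) : String :=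
  let v := PySem.Chars.strip value.toList
  if PySem.Chars.isIn ['\n'] v then
    -- [f"{prefix}{v}{suffix}" for v in value.splitlines() if v.strip() != ""]
    let processed :=
      ((PySem.Chars.splitlines v).filter (fun l => PySem.Chars.strip l ≠ [])).map
        (fun l => prefix_.toList ++ l ++ suffix.toList)
    -- processed[-1] = processed[-1].removesuffix(suffix)  (index -1 = length-1; the list is
    -- nonempty here, since the stripped value starts with a non-whitespace character)
    let processed := processed.set (processed.length - 1)
      (pvRemoveSuffix (processed.getD (processed.length - 1) []) suffix.toList)
    -- processed[0] = processed[0].removeprefix(prefix)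
    let processed := processed.set 0 (pvRemovePrefix (processed.getD 0 []) prefix_.toList)
    String.ofList (PySem.Chars.join joiner.toList processed)
  else
    String.ofList v

-- ===== PORT B =====
def multiline_string_validator_alt (value : String) (prefix_ : String) (suffix : String) (joiner : String) : String :=
  let v := PySem.Chars.strip value.toList
  if PySem.Chars.isIn ['\n'] v then
    String.ofList (PySem.Chars.join (suffix.toList ++ joiner.toList ++ prefix_.toList)
      ((PySem.Chars.splitlines v).filter (fun l => PySem.Chars.strip l ≠ [])))
  else
    String.ofList v

-- ===== PRECONDITION & SPEC =====
def Spec_multiline_string_validator (value : String) (prefix_ : String) (suffix : String) (joiner : String) (out : String) : Prop := out = multiline_string_validator_alt value prefix_ suffix joiner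
instance (value : String) (prefix_ : String) (suffix : String) (joiner : String) (out : String) : Decidable (Spec_multiline_string_validator value prefix_ suffix joiner out) := by unfold Spec_multiline_string_validator; infer_instance

-- ===== CLAIM (what is proved, stated in full; the proofs are below) =====
def Claim_equal_multiline_string_validator : Prop := ∀ (value : String) (prefix_ : String) (suffix : String) (joiner : String), Dom_multiline_string_validator value prefix_ suffix joiner → Spec_multiline_string_validator value prefix_ suffix joiner (multiline_string_validator value prefix_ suffix joiner)

-- ===== LEMMAS AND PROOFS =====

theorem pvRemoveSuffix_wrap (p v s : List Char) :
    pvRemoveSuffix (p ++ (v ++ s)) s = p ++ v := by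
  have he : p ++ (v ++ s) = (p ++ v) ++ s := by simp
  have h : PySem.Chars.endswith (p ++ (v ++ s)) s = true :=
    (PySem.Chars.endswith_iff _ _).2 ⟨p ++ v, he.symm⟩
  rw [pvRemoveSuffix, if_pos h, he,
    show ((p ++ v) ++ s).length - s.length = (p ++ v).length by
      simp only [List.length_append]; omega]
  exact List.take_left

theorem pvRemovePrefix_wrap (p v : List Char) :
    pvRemovePrefix (p ++ v) p = v := by
  have h : PySem.Chars.startswith (p ++ v) p = true :=
    (PySem.Chars.startswith_iff _ _).2 ⟨v, rfl⟩
  simp [pvRemovePrefix, h]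

theorem join_cons_of_ne_nil (sep q : List Char) (l : List (List Char)) (h : l ≠ []) :
    PySem.Chars.join sep (q :: l) = q ++ sep ++ PySem.Chars.join sep l := by
  cases l with
  | nil => exact absurd rfl h
  | cons x t => exact PySem.Chars.join_cons_cons sep q x t

-- the tail of A's fixed-up list joins to prefix ++ (B's join of the same tail lines)
theorem pv_tail_join (j p s : List Char) :
    ∀ (M : List (List Char)) (w : List Char),
      PySem.Chars.join j (M.map (fun l => p ++ l ++ s) ++ [p ++ w]) =
        p ++ PySem.Chars.join (s ++ j ++ p) (M ++ [w]) := by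
  intro M
  induction M with
  | nil => intro w; simp [PySem.Chars.join_singleton]
  | cons v M' ih =>
    intro w
    rw [List.map_cons, List.cons_append, join_cons_of_ne_nil j _ _ (by simp),
      ih w, List.cons_append, join_cons_of_ne_nil (s ++ j ++ p) _ _ (by simp)]
    simp [List.append_assoc]

-- A's wrap-then-patch pipeline over any line list L equals B's single join
theorem pv_main (j p s : List Char) (L : List (List Char)) :
    (let W := L.map (fun l => p ++ l ++ s)
     let W := W.set (W.length - 1) (pvRemoveSuffix (W.getD (W.length - 1) []) s)
     let W := W.set 0 (pvRemovePrefix (W.getD 0 []) p)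
     PySem.Chars.join j W) = PySem.Chars.join (s ++ j ++ p) L := by
  dsimp only
  rcases L with _ | ⟨v0, rest⟩
  · simp [PySem.Chars.join_nil]
  rcases List.eq_nil_or_concat rest with h | ⟨M, w, h⟩
  · subst h
    simp only [List.map_cons, List.map_nil, List.length_cons, List.length_nil,
      Nat.zero_add, Nat.sub_self, List.getD_cons_zero, List.set_cons_zero,
      List.append_assoc, pvRemoveSuffix_wrap p v0 s]
    rw [pvRemovePrefix_wrap p v0]
    simp [PySem.Chars.join_singleton]
  · subst h
    simp only [List.concat_eq_append]
    have hgetlast :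
        ((v0 :: (M ++ [w])).map (fun l => p ++ l ++ s)).getD
            (((v0 :: (M ++ [w])).map (fun l => p ++ l ++ s)).length - 1) []
          = p ++ (w ++ s) := by
      rw [List.getD_eq_getElem?_getD]
      simp
    rw [hgetlast, pvRemoveSuffix_wrap p w s]
    have hset1 :
        ((v0 :: (M ++ [w])).map (fun l => p ++ l ++ s)).set
            (((v0 :: (M ++ [w])).map (fun l => p ++ l ++ s)).length - 1) (p ++ w)
          = (p ++ v0 ++ s) :: (M.map (fun l => p ++ l ++ s) ++ [p ++ w]) := by
      simp only [List.map_cons, List.map_append, List.length_cons, List.length_append,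
        List.length_map, List.map_nil, List.length_nil, Nat.add_sub_cancel]
      rw [show M.length + (0 + 1)
            = (M.map (fun l => p ++ l ++ s)).length + 1 by simp,
        List.set_cons_succ, List.set_append_right _ _ (le_refl _)]
      simp
    rw [hset1, List.getD_cons_zero,
      show p ++ v0 ++ s = p ++ (v0 ++ s) by simp, pvRemovePrefix_wrap p (v0 ++ s),
      List.set_cons_zero, join_cons_of_ne_nil j _ _ (by simp), pv_tail_join j p s M w,
      join_cons_of_ne_nil (s ++ j ++ p) _ _ (by simp)]
    simp [List.append_assoc]

-- ===== VERDICT (by name: the statement is the Claim_ definition above) =====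
theorem multiline_string_validator_spec : Claim_equal_multiline_string_validator := by
  intro value prefix_ suffix joiner _
  unfold Spec_multiline_string_validator multiline_string_validator multiline_string_validator_alt
  by_cases h : PySem.Chars.isIn ['\n'] (PySem.Chars.strip value.toList) = true
  · simp only [h, if_true]
    exact congrArg String.ofList
      (pv_main joiner.toList prefix_.toList suffix.toList _)
  · simp only [Bool.not_eq_true] at h
    simp [h]
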